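-- pv_equiv track=rewrite | github.com/ThomasJackDalby/rubiks | rubiks.py | rotate_face
-- ===== SOURCE A (Python) =====
-- CUBE_ORDER = 2
--
-- NUM_TILES_FACE = CUBE_ORDER * CUBE_ORDER
--
-- def get_face_index(x, y):
--     """Get the index for a tile within a face."""
--     return y * CUBE_ORDER + x
--
-- def rotate_face(face, amount):
--     if amount == 0:
--         return face
--     elif amount < 0:
--         delta = 1
--         get_rotated_face_index = lambda x, y: get_face_index(y, CUBE_ORDER - x - 1)
--     else:
--         delta = -1
--         get_rotated_face_index = lambda x, y: get_face_index(CUBE_ORDER - y - 1, x)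
--
--     next_face = [0] * NUM_TILES_FACE
--     for y in range(CUBE_ORDER):
--         for x in range(CUBE_ORDER):
--             i = get_face_index(x, y)
--             j = get_rotated_face_index(x, y)
--             next_face[j] = face[i]
--     return rotate_face(next_face, amount + delta)
-- ===== SOURCE B (Python) =====
-- CUBE_ORDER = 2
--
-- NUM_TILES_FACE = CUBE_ORDER * CUBE_ORDER
--
-- # index permutations for 0,1,2,3 quarter turns in A's positive direction
-- _PERMS = [[0, 1, 2, 3], [2, 0, 3, 1], [3, 2, 1, 0], [1, 3, 0, 2]]
--
-- def rotate_face(face, amount):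
--     if amount == 0:
--         return face
--     return [face[i] for i in _PERMS[amount % 4]]
-- ===== Notes on version B (the rewrite author's own statement) =====
-- stated objective: alternative
-- what changed: Replaced A's quarter-turn-at-a-time recursion (one index-remapping pass per unit of |amount|) with a single table-driven pass using the precomputed permutation for amount % 4.
import Mathlib
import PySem

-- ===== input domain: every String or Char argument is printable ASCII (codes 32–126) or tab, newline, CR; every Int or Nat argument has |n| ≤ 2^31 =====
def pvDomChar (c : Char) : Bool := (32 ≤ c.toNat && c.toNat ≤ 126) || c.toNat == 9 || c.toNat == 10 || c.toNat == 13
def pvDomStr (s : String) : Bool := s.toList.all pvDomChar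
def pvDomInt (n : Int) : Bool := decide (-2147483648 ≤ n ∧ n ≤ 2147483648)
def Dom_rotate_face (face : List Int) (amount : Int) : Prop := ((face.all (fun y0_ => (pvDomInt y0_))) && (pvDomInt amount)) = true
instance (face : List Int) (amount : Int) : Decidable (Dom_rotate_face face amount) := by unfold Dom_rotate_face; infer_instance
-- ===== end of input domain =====

-- B replaces A's one-quarter-turn-at-a-time recursion with a single table-driven pass
-- using the precomputed permutation for amount % 4 (objective: alternative decomposition).


-- ===== PORT A =====
def get_face_index (x y : Int) : Int := y * 2 + x

-- literal transliteration of A; face[i] is in range under Pre_, and the assignment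
-- index j is always 0..3 (nonnegative), so List.set at j.toNat is exact.
def rotate_face (face : List Int) (amount : Int) : List Int :=
  if amount = 0 then face
  else
    let delta : Int := if amount < 0 then 1 else -1
    let gri : Int → Int → Int :=
      if amount < 0 then fun x y => get_face_index y (2 - x - 1)
      else fun x y => get_face_index (2 - y - 1) x
    let next_face : List Int :=
      (PySem.List.pyRange 0 2 1).foldl (fun nf y =>
        (PySem.List.pyRange 0 2 1).foldl (fun nf x =>
          let i := get_face_index x y
          let j := gri x y
          PySem.List.pySetD nf j (PySem.List.pyGetD face i 0)) nf) [0, 0, 0, 0]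
    rotate_face next_face (amount + delta)
termination_by amount.natAbs
decreasing_by split <;> omega

-- ===== PORT B =====
def pvPerms : List (List Int) := [[0, 1, 2, 3], [2, 0, 3, 1], [3, 2, 1, 0], [1, 3, 0, 2]]

def rotate_face_alt (face : List Int) (amount : Int) : List Int :=
  if amount = 0 then face
  else (pvPerms.getD (PySem.Int.mod amount 4).toNat []).map
         (fun i => PySem.List.pyGetD face i 0)

-- ===== PRECONDITION & SPEC =====
-- Pre_ excludes exactly the inputs where Python A raises IndexError:
-- amount ≠ 0 with fewer than 4 tiles (A indexes face[0..3]).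
def Pre_rotate_face (face : List Int) (amount : Int) : Prop :=
  amount = 0 ∨ 4 ≤ face.length
instance (face : List Int) (amount : Int) : Decidable (Pre_rotate_face face amount) := by
  unfold Pre_rotate_face; infer_instance

def pvWitness_rotate_face : List Int × Int := ([1, 2, 3, 4], 3)

def Spec_rotate_face (face : List Int) (amount : Int) (out : List Int) : Prop := out = rotate_face_alt face amount
instance (face : List Int) (amount : Int) (out : List Int) : Decidable (Spec_rotate_face face amount out) := by unfold Spec_rotate_face; infer_instance

-- ===== CLAIM (what is proved, stated in full; the proofs are below) =====
def Claim_equal_rotate_face : Prop := ∀ (face : List Int) (amount : Int), Dom_rotate_face face amount → Pre_rotate_face face amount → Spec_rotate_face face amount (rotate_face face amount)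

-- ===== LEMMAS AND PROOFS =====

-- One positive A-step on a face with ≥ 4 tiles yields [c, a, d, b].
theorem rotate_face_pos_step (a b c d : Int) (t : List Int) (n : Int)
    (h0 : n ≠ 0) (hpos : ¬ n < 0) :
    rotate_face (a :: b :: c :: d :: t) n = rotate_face [c, a, d, b] (n - 1) := by
  have hr : PySem.List.pyRange 0 2 1 = [0, 1] := by decide
  rw [show n - 1 = n + -1 by ring, rotate_face]
  simp [h0, hpos, hr, get_face_index, PySem.List.pySetD, PySem.List.pySet?,
    PySem.List.pyIdx?, PySem.List.pyGetD_ofNat']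

-- One negative A-step on a face with ≥ 4 tiles yields [b, d, a, c].
theorem rotate_face_neg_step (a b c d : Int) (t : List Int) (n : Int)
    (hneg : n < 0) :
    rotate_face (a :: b :: c :: d :: t) n = rotate_face [b, d, a, c] (n + 1) := by
  have hr : PySem.List.pyRange 0 2 1 = [0, 1] := by decide
  rw [rotate_face]
  simp [show n ≠ 0 by omega, hneg, hr, get_face_index, PySem.List.pySetD,
    PySem.List.pySet?, PySem.List.pyIdx?, PySem.List.pyGetD_ofNat']

-- B only reads indices 0..3, so any tail beyond 4 tiles is irrelevant when amount ≠ 0.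
theorem alt_take4 (a b c d : Int) (t : List Int) (m : Int) (hm : m ≠ 0) :
    rotate_face_alt (a :: b :: c :: d :: t) m = rotate_face_alt [a, b, c, d] m := by
  have h4 : m % 4 = 0 ∨ m % 4 = 1 ∨ m % 4 = 2 ∨ m % 4 = 3 := by omega
  rcases h4 with h | h | h | h <;>
    simp [rotate_face_alt, hm, h, pvPerms, PySem.List.pyGetD_ofNat']

-- Shifting one positive quarter-turn through B's table.
theorem alt_succ (a b c d : Int) (n : Int) (hn : 0 ≤ n) :
    rotate_face_alt [c, a, d, b] n = rotate_face_alt [a, b, c, d] (n + 1) := by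
  have h4 : n % 4 = 0 ∨ n % 4 = 1 ∨ n % 4 = 2 ∨ n % 4 = 3 := by omega
  rcases h4 with h | h | h | h <;>
    [(have hs : (n + 1) % 4 = 1 := by omega);
     (have hs : (n + 1) % 4 = 2 := by omega);
     (have hs : (n + 1) % 4 = 3 := by omega);
     (have hs : (n + 1) % 4 = 0 := by omega)] <;>
    by_cases hz : n = 0 <;>
    simp [rotate_face_alt, hz, h, hs, show n + 1 ≠ 0 by omega, pvPerms,
      PySem.List.pyGetD_ofNat']

-- Shifting one negative quarter-turn through B's table.
theorem alt_pred (a b c d : Int) (n : Int) (hn : n ≤ 0) :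
    rotate_face_alt [b, d, a, c] n = rotate_face_alt [a, b, c, d] (n - 1) := by
  have h4 : n % 4 = 0 ∨ n % 4 = 1 ∨ n % 4 = 2 ∨ n % 4 = 3 := by omega
  rcases h4 with h | h | h | h <;>
    [(have hs : (n - 1) % 4 = 3 := by omega);
     (have hs : (n - 1) % 4 = 0 := by omega);
     (have hs : (n - 1) % 4 = 1 := by omega);
     (have hs : (n - 1) % 4 = 2 := by omega)] <;>
    by_cases hz : n = 0 <;>
    simp [rotate_face_alt, hz, h, hs, show n - 1 ≠ 0 by omega, pvPerms,
      PySem.List.pyGetD_ofNat']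

-- A = B on 4-element faces, for nonnegative amounts, by induction on the amount.
theorem agree_pos (k : Nat) : ∀ (a b c d : Int),
    rotate_face [a, b, c, d] (k : Int) = rotate_face_alt [a, b, c, d] (k : Int) := by
  induction k with
  | zero => intro a b c d; rw [rotate_face, rotate_face_alt]; norm_num
  | succ m ih =>
    intro a b c d
    have hstep := rotate_face_pos_step a b c d [] ((m : Int) + 1)
      (by omega) (by omega)
    rw [show ((m + 1 : Nat) : Int) = (m : Int) + 1 by push_cast; ring, hstep]
    rw [show (m : Int) + 1 - 1 = (m : Int) by ring, ih c a d b]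
    exact alt_succ a b c d (m : Int) (by omega)

-- A = B on 4-element faces, for nonpositive amounts.
theorem agree_neg (k : Nat) : ∀ (a b c d : Int),
    rotate_face [a, b, c, d] (-(k : Int)) = rotate_face_alt [a, b, c, d] (-(k : Int)) := by
  induction k with
  | zero => intro a b c d; rw [rotate_face, rotate_face_alt]; norm_num
  | succ m ih =>
    intro a b c d
    have hstep := rotate_face_neg_step a b c d [] (-((m : Int) + 1)) (by omega)
    rw [show (-((m + 1 : Nat) : Int)) = -((m : Int) + 1) by push_cast; ring, hstep]
    rw [show -((m : Int) + 1) + 1 = -(m : Int) by ring, ih b d a c]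
    have := alt_pred a b c d (-(m : Int)) (by omega)
    rw [show -(m : Int) - 1 = -((m : Int) + 1) by ring] at this
    exact this

-- ===== VERDICT (by name: the statement is the Claim_ definition above) =====
theorem rotate_face_spec : Claim_equal_rotate_face := by
  intro face amount _hd hpre
  unfold Spec_rotate_face
  by_cases hz : amount = 0
  · subst hz; rw [rotate_face, rotate_face_alt]; norm_num
  · rcases hpre with hz' | hlen
    · exact absurd hz' hz
    · obtain ⟨a, b, c, d, t, rfl⟩ : ∃ a b c d t, face = a :: b :: c :: d :: t := by
        match face, hlen with
        | a :: b :: c :: d :: t, _ => exact ⟨a, b, c, d, t, rfl⟩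
      rw [alt_take4 a b c d t amount hz]
      by_cases hneg : amount < 0
      · obtain ⟨k, hk⟩ : ∃ k : Nat, amount = -((k : Int) + 1) := by
          refine ⟨(-amount - 1).toNat, ?_⟩; omega
        rw [hk, rotate_face_neg_step a b c d t _ (by omega)]
        rw [show -((k : Int) + 1) + 1 = -(k : Int) by ring, agree_neg k b d a c]
        have := alt_pred a b c d (-(k : Int)) (by omega)
        rw [show -(k : Int) - 1 = -((k : Int) + 1) by ring] at this
        exact this
      · obtain ⟨k, hk⟩ : ∃ k : Nat, amount = (k : Int) + 1 := by
          refine ⟨(amount - 1).toNat, ?_⟩; omega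
        rw [hk, rotate_face_pos_step a b c d t _ (by omega) (by omega)]
        rw [show (k : Int) + 1 - 1 = (k : Int) by ring, agree_pos k c a d b]
        exact alt_succ a b c d (k : Int) (by omega)
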